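-- pv_equiv track=rewrite | github.com/unmeshvrije/programming-for-kids | projects/programming-time/main.py | ignore_until_comment
-- ===== SOURCE A (Python) =====
-- def ignore_until_comment(line):
--     ignore = True
--     out = ''
--     for s in line:
--         if s == '#':
--             ignore = False
--         if not ignore:
--             out += s
--         else:
--             out += ' '
--     return out
-- ===== SOURCE B (Python) =====
-- def ignore_until_comment(line):
--     idx = line.find('#')
--     if idx == -1:
--         return ' ' * len(line)
--     return ' ' * idx + line[idx:]
-- ===== Notes on version B (the rewrite author's own statement) =====
-- stated objective: simpler
-- what changed: Replaced the stateful per-character loop with an ignore flag and string accumulator by a single find of the comment marker followed by a spaces-prefix plus slice closed form.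
import Mathlib
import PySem

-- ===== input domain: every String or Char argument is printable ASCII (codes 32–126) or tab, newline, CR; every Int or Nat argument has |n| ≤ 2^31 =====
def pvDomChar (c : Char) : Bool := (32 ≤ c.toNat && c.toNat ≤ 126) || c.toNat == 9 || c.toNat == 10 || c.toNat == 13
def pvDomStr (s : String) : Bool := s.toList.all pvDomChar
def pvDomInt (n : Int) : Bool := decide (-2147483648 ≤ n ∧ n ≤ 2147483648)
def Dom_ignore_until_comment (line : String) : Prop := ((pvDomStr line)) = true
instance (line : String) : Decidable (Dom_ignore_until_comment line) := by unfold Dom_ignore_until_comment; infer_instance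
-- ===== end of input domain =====

-- B replaces A's per-character loop with an 'ignore' flag by find('#') plus a spaces-prefix/slice closed form (objective: simpler).

-- ===== PORT A =====
-- literal port: fold over the characters with state (ignore, out)
def ignore_until_comment (line : String) : String :=
  let r := line.toList.foldl
    (fun (st : Bool × List Char) s =>
      let ignore := if s = '#' then false else st.1
      let out := if !ignore then st.2 ++ [s] else st.2 ++ [' ']
      (ignore, out))
    (true, [])
  String.ofList r.2

-- ===== PORT B =====
def ignore_until_comment_alt (line : String) : String :=
  let idx := PySem.Str.find line "#"
  if idx = -1 then String.ofList (List.replicate line.toList.length ' ')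
  else String.ofList (List.replicate idx.toNat ' ' ++ PySem.List.slice line.toList (some idx) none)

-- ===== PRECONDITION & SPEC =====
def Spec_ignore_until_comment (line : String) (out : String) : Prop := out = ignore_until_comment_alt line
instance (line : String) (out : String) : Decidable (Spec_ignore_until_comment line out) := by unfold Spec_ignore_until_comment; infer_instance

-- ===== CLAIM (what is proved, stated in full; the proofs are below) =====
def Claim_equal_ignore_until_comment : Prop := ∀ (line : String), Dom_ignore_until_comment line → Spec_ignore_until_comment line (ignore_until_comment line)

-- ===== LEMMAS AND PROOFS =====

-- A's loop body
def pvStepA (st : Bool × List Char) (s : Char) : Bool × List Char :=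
  let ignore := if s = '#' then false else st.1
  let out := if !ignore then st.2 ++ [s] else st.2 ++ [' ']
  (ignore, out)

-- recursive characterisation of the result
def pvG : List Char → List Char
  | [] => []
  | c :: t => if c = '#' then c :: t else ' ' :: pvG t

theorem pvFoldFalse (l acc : List Char) :
    l.foldl pvStepA (false, acc) = (false, acc ++ l) := by
  induction l generalizing acc with
  | nil => simp
  | cons c t ih => simp [pvStepA, ih]

theorem pvFoldTrue (l acc : List Char) :
    (l.foldl pvStepA (true, acc)).2 = acc ++ pvG l := by
  induction l generalizing acc with
  | nil => simp [pvG]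
  | cons c t ih =>
    by_cases h : c = '#'
    · simp [List.foldl_cons, pvStepA, h, pvG, pvFoldFalse]
    · simp [List.foldl_cons, pvStepA, h, pvG, ih]

theorem pvSingletonPrefix (c : Char) (t : List Char) :
    ['#'] <+: (c :: t) ↔ c = '#' := by
  simp [List.cons_prefix_cons, eq_comm]

theorem pvSingletonInfix (l : List Char) : ['#'] <:+: l ↔ '#' ∈ l := by
  constructor
  · intro h; exact h.mem (by simp)
  · intro h
    obtain ⟨s, t, rfl⟩ := List.append_of_mem h
    exact ⟨s, t, by simp⟩

theorem pvFindConsSelf (t : List Char) :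
    PySem.Chars.find ('#' :: t) ['#'] = 0 := by
  have hin : ['#'] <:+: ('#' :: t) := (pvSingletonInfix _).2 (by simp)
  have hnn : 0 ≤ PySem.Chars.find ('#' :: t) ['#'] :=
    (PySem.Chars.find_nonneg_iff _ _).2 hin
  have hspec := PySem.Chars.find_spec hnn
  by_contra hne
  have hpos : 0 < (PySem.Chars.find ('#' :: t) ['#']).toNat := by omega
  have := hspec.2 0 hpos
  simp at this

theorem pvFindConsNeg (c : Char) (t : List Char) (hc : c ≠ '#')
    (h : PySem.Chars.find t ['#'] = -1) :
    PySem.Chars.find (c :: t) ['#'] = -1 := by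
  rw [PySem.Chars.find_eq_neg_one_iff] at h ⊢
  rw [pvSingletonInfix] at h ⊢
  simp [Ne.symm hc, h]

theorem pvFindConsPos (c : Char) (t : List Char) (hc : c ≠ '#')
    (h : 0 ≤ PySem.Chars.find t ['#']) :
    PySem.Chars.find (c :: t) ['#'] = PySem.Chars.find t ['#'] + 1 := by
  have htspec := PySem.Chars.find_spec h
  have hin : ['#'] <:+: (c :: t) := by
    rw [pvSingletonInfix]
    have : ['#'] <:+: t := (PySem.Chars.find_nonneg_iff _ _).1 h
    exact List.mem_cons_of_mem _ (((pvSingletonInfix t).1 this))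
  have hnn : 0 ≤ PySem.Chars.find (c :: t) ['#'] :=
    (PySem.Chars.find_nonneg_iff _ _).2 hin
  have hspec := PySem.Chars.find_spec hnn
  set f := PySem.Chars.find (c :: t) ['#'] with hf
  set k := PySem.Chars.find t ['#'] with hk
  -- candidate position k.toNat + 1 has a '#'-prefix, and none below it
  have hcand : ['#'] <+: (c :: t).drop (k.toNat + 1) := by
    simpa using htspec.1
  have hmin : ∀ i, i < k.toNat + 1 → ¬ ['#'] <+: (c :: t).drop i := by
    intro i hi
    cases i with
    | zero => simp only [List.drop_zero, pvSingletonPrefix]; exact hc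
    | succ j =>
      have : j < k.toNat := by omega
      simpa using htspec.2 j this
  have h1 : ¬ f.toNat < k.toNat + 1 := fun hlt => hmin f.toNat hlt hspec.1
  have h2 : ¬ k.toNat + 1 < f.toNat := fun hlt => hspec.2 (k.toNat + 1) hlt hcand
  omega

theorem pvG_eq (l : List Char) :
    pvG l = if PySem.Chars.find l ['#'] = -1 then List.replicate l.length ' '
      else List.replicate (PySem.Chars.find l ['#']).toNat ' ' ++ l.drop (PySem.Chars.find l ['#']).toNat := by
  induction l with
  | nil =>
    simp [pvG, PySem.Chars.find_eq_neg_one_iff]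
  | cons c t ih =>
    by_cases hc : c = '#'
    · subst hc
      simp [pvG, pvFindConsSelf]
    · have hle := PySem.Chars.neg_one_le_find t ['#']
      by_cases ht : PySem.Chars.find t ['#'] = -1
      · rw [pvFindConsNeg c t hc ht] at *
        simp [pvG, hc, ih, ht, List.replicate_succ]
      · have hpos : 0 ≤ PySem.Chars.find t ['#'] := by omega
        have hrec := pvFindConsPos c t hc hpos
        have hne' : PySem.Chars.find t ['#'] + 1 ≠ -1 := by omega
        rw [pvG, if_neg hc, ih, if_neg ht, hrec, if_neg hne']
        have hT : (PySem.Chars.find t ['#'] + 1).toNat = (PySem.Chars.find t ['#']).toNat + 1 := by omega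
        simp [hT, List.replicate_succ]

-- ===== VERDICT (by name: the statement is the Claim_ definition above) =====
theorem ignore_until_comment_spec : Claim_equal_ignore_until_comment := by
  intro line _
  unfold Spec_ignore_until_comment ignore_until_comment ignore_until_comment_alt
  have hfold : (line.toList.foldl pvStepA (true, [])).2 = pvG line.toList := by
    simpa using pvFoldTrue line.toList []
  show String.ofList (line.toList.foldl pvStepA (true, [])).2 = _
  rw [hfold, pvG_eq]
  by_cases h : PySem.Chars.find line.toList ['#'] = -1
  · simp [PySem.Str.find_eq, h]
  · have hpos : 0 ≤ PySem.Chars.find line.toList ['#'] := by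
      have := PySem.Chars.neg_one_le_find line.toList ['#']; omega
    simp [PySem.Str.find_eq, h, PySem.List.slice_from _ hpos]
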